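-- pv_equiv track=rewrite | github.com/PennyQ/dataspot | dataspot/network/node_calculator.py | calculate_usage_score
-- ===== SOURCE A (Python) =====
-- def calculate_usage_score(node, relationships):
--     linked_nodes = list()
--     for node_key, node_value in relationships.items():
--         if node in node_value:
--             linked_nodes.append(node_key)
--
--     used_keys = list()
--     for node_source in linked_nodes:
--         for node_key, node_value in relationships.items():
--             if node_source in node_value and node_key not in used_keys:
--                 linked_nodes.append(node_key)
--                 used_keys.append(node_key)
--
--     score = len(linked_nodes)
--     return score
-- ===== SOURCE B (Python) =====
-- def calculate_usage_score(node, relationships):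
--     # Build a reverse-adjacency index once, then traverse it with a visited set:
--     # rev[x] = keys whose value list contains x, in key order.
--     rev = {}
--     for key, values in relationships.items():
--         for v in set(values):
--             rev.setdefault(v, []).append(key)
--     direct = rev.get(node, [])
--     visited = set()
--     queue = list(direct)
--     i = 0
--     while i < len(queue):
--         for key in rev.get(queue[i], []):
--             if key not in visited:
--                 visited.add(key)
--                 queue.append(key)
--         i += 1
--     return len(direct) + len(visited)
-- ===== Notes on version B (the rewrite author's own statement) =====
-- stated objective: alternative
-- what changed: Replaced the repeated full scans of relationships and the linear 'not in used_keys' list membership by a reverse-adjacency index built once plus a worklist traversal over it with a visited set; asymptotically better on dense graphs but not measurably faster on the generated benchmark inputs.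
import Mathlib
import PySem

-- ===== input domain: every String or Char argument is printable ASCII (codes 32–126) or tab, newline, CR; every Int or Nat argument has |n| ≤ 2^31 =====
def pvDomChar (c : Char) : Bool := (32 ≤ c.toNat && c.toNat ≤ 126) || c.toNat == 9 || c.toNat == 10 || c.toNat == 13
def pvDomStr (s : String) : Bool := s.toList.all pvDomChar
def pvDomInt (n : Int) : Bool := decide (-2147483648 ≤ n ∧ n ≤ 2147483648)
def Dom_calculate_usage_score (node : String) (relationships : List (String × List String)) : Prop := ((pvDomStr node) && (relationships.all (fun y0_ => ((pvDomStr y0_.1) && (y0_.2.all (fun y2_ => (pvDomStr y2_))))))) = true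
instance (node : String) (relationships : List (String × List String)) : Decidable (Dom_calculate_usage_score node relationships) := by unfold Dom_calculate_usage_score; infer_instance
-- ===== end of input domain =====

-- B replaces A's repeated full scans and linear used_keys membership by a reverse-adjacency
-- index built once plus a worklist traversal over it with a visited set (alternative algorithm).


-- ===== PORT A =====
-- one step of A's second loop: one full scan of relationships for node_source x,
-- state = (keys appended during this scan, linked_nodes, used_keys)
def pvScanA (rels : List (String × List String)) (x : String)
    (st : List String × List String × List String) : List String × List String × List String :=
  rels.foldl (fun st kv =>
    if x ∈ kv.2 ∧ kv.1 ∉ st.2.2 then (st.1 ++ [kv.1], st.2.1 ++ [kv.1], st.2.2 ++ [kv.1]) else st) st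

-- A's 'for node_source in linked_nodes' over a list that grows while being iterated:
-- pending = the not-yet-visited tail of linked_nodes; the fuel only guards termination
-- (it never runs out: each new pending entry also enters used_keys, which only ever
--  receives distinct keys of relationships).
def pvLoopA (rels : List (String × List String)) :
    List String → List String → List String → Nat → List String
  | [], linked, _, _ => linked
  | _ :: _, linked, _, 0 => linked
  | x :: rest, linked, used, Nat.succ fuel =>
      let st := pvScanA rels x ([], linked, used)
      pvLoopA rels (rest ++ st.1) st.2.1 st.2.2 fuel

def calculate_usage_score (node : String) (relationships : List (String × List String)) : Int :=
  let linked_nodes := relationships.foldl (fun acc kv => if node ∈ kv.2 then acc ++ [kv.1] else acc) []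
  let final := pvLoopA relationships linked_nodes linked_nodes [] (linked_nodes.length + relationships.length)
  (final.length : Int)

-- ===== PORT B =====
-- rev[x] = the keys whose value list contains x, in key order (built once)
def pvRevIdx (rels : List (String × List String)) : PySem.Dict String (List String) :=
  rels.foldl (fun d kv =>
    (PySem.Set.ofList kv.2).foldl (fun d v => d.modify v [] (· ++ [kv.1])) d) PySem.Dict.empty

-- the while loop over the growing queue; state = (queue tail from index i, visited);
-- the fuel only guards termination (never exhausted: every enqueued key enters visited).
def pvLoopB (rev : PySem.Dict String (List String)) :
    List String → PySem.Set String → Nat → PySem.Set String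
  | [], visited, _ => visited
  | _ :: _, visited, 0 => visited
  | x :: rest, visited, Nat.succ fuel =>
      let st := (rev.getD x []).foldl
        (fun (st : List String × PySem.Set String) k =>
          if k ∈ st.2 then st else (st.1 ++ [k], PySem.Set.add st.2 k)) ([], visited)
      pvLoopB rev (rest ++ st.1) st.2 fuel

def calculate_usage_score_alt (node : String) (relationships : List (String × List String)) : Int :=
  let rev := pvRevIdx relationships
  let direct := rev.getD node []
  let visited := pvLoopB rev direct PySem.Set.empty (direct.length + relationships.length)
  (direct.length : Int) + (PySem.Set.len visited : Int)

-- ===== PRECONDITION & SPEC =====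
def Spec_calculate_usage_score (node : String) (relationships : List (String × List String)) (out : Int) : Prop := out = calculate_usage_score_alt node relationships
instance (node : String) (relationships : List (String × List String)) (out : Int) : Decidable (Spec_calculate_usage_score node relationships out) := by unfold Spec_calculate_usage_score; infer_instance

-- ===== CLAIM (what is proved, stated in full; the proofs are below) =====
def Claim_equal_calculate_usage_score : Prop := ∀ (node : String) (relationships : List (String × List String)), Dom_calculate_usage_score node relationships → Spec_calculate_usage_score node relationships (calculate_usage_score node relationships)

-- ===== LEMMAS AND PROOFS =====

-- the keys a single scan for x appends beyond news-so-far n, membership checked in u ++ n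
def pvNews (x : String) : List (String × List String) → List String → List String → List String
  | [], _, n => n
  | kv :: rest, u, n =>
      if x ∈ kv.2 ∧ kv.1 ∉ u ++ n then pvNews x rest u (n ++ [kv.1]) else pvNews x rest u n

-- same, driven by a plain key list (B's inner loop over rev[x])
def pvNewsKeys : List String → List String → List String → List String
  | [], _, n => n
  | k :: rest, u, n =>
      if k ∉ u ++ n then pvNewsKeys rest u (n ++ [k]) else pvNewsKeys rest u n

-- A's scan, started in the aligned shape, produces (N, linked ++ N, used ++ N)
theorem pvScanA_shape (x : String) : ∀ (rels : List (String × List String)) (n l u : List String),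
    pvScanA rels x (n, l ++ n, u ++ n) =
      (pvNews x rels u n, l ++ pvNews x rels u n, u ++ pvNews x rels u n) := by
  intro rels
  induction rels with
  | nil => intro n l u; rfl
  | cons kv rest ih =>
      intro n l u
      simp only [pvScanA, List.foldl_cons, pvNews]
      by_cases h : x ∈ kv.2 ∧ kv.1 ∉ u ++ n
      · rw [if_pos h, if_pos h]
        have := ih (n ++ [kv.1]) l u
        simpa [pvScanA, List.append_assoc] using this
      · rw [if_neg h, if_neg h]
        exact ih n l u

-- B's inner fold over a key list produces (M, used ++ M)
theorem pvScanB_shape : ∀ (ks : List String) (n u : List String),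
    ks.foldl (fun (st : List String × PySem.Set String) k =>
        if k ∈ st.2 then st else (st.1 ++ [k], PySem.Set.add st.2 k)) (n, u ++ n) =
      (pvNewsKeys ks u n, u ++ pvNewsKeys ks u n) := by
  intro ks
  induction ks with
  | nil => intro n u; rfl
  | cons k rest ih =>
      intro n u
      simp only [List.foldl_cons, pvNewsKeys]
      by_cases h : k ∈ u ++ n
      · rw [if_pos h, if_neg (not_not_intro h)]
        exact ih n u
      · have hadd : PySem.Set.add (u ++ n) k = u ++ (n ++ [k]) := by
          simp [PySem.Set.add, PySem.Set.contains, h, List.append_assoc]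
        rw [if_neg h, if_pos h, hadd]
        exact ih (n ++ [k]) u

-- the two news computations agree when B's key list is rev[x]
theorem pvNewsKeys_eq_pvNews (x : String) : ∀ (rels : List (String × List String)) (u n : List String),
    pvNewsKeys ((rels.filter (fun kv => decide (x ∈ kv.2))).map Prod.fst) u n = pvNews x rels u n := by
  intro rels
  induction rels with
  | nil => intro u n; rfl
  | cons kv rest ih =>
      intro u n
      by_cases hx : x ∈ kv.2
      · simp only [List.filter_cons, decide_eq_true_eq, if_pos hx, List.map_cons, pvNewsKeys, pvNews]
        by_cases hk : kv.1 ∈ u ++ n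
        · rw [if_neg (by simp [hk]), if_neg (by simp [hx, hk])]
          exact ih u n
        · rw [if_pos hk, if_pos ⟨hx, hk⟩]
          exact ih u (n ++ [kv.1])
      · simp only [List.filter_cons, decide_eq_true_eq, if_neg hx, pvNews, if_neg (by simp [hx] : ¬ (x ∈ kv.2 ∧ kv.1 ∉ u ++ n))]
        exact ih u n

-- one entry (key c, deduplicated value list l): its inner fold appends c to rev[x] iff x ∈ l
theorem rev_inner (c x : String) : ∀ (l : List String), l.Nodup → ∀ (d : PySem.Dict String (List String)),
    (l.foldl (fun d v => d.modify v [] (· ++ [c])) d).getD x []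
      = d.getD x [] ++ (if x ∈ l then [c] else []) := by
  intro l
  induction l with
  | nil => intro _ d; simp
  | cons a rest ih =>
      intro hnd d
      rcases List.nodup_cons.mp hnd with ⟨ha, hrest⟩
      simp only [List.foldl_cons]
      rw [ih hrest]
      rw [PySem.Dict.getD_modify]
      by_cases hx : x = a
      · subst hx
        rw [if_pos rfl, if_neg (by exact fun h => ha h), if_pos (List.mem_cons_self ..)]
        simp
      · rw [if_neg hx]
        by_cases hxr : x ∈ rest
        · rw [if_pos hxr, if_pos (List.mem_cons_of_mem _ hxr)]
        · rw [if_neg hxr, if_neg (by simp [hx, hxr])]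

-- the whole build: rev[x] accumulates the keys of entries containing x, in order
theorem rev_aux (x : String) : ∀ (rels : List (String × List String)) (d : PySem.Dict String (List String)),
    (rels.foldl (fun d kv =>
        (PySem.Set.ofList kv.2).foldl (fun d v => d.modify v [] (· ++ [kv.1])) d) d).getD x []
      = d.getD x [] ++ (rels.filter (fun kv => decide (x ∈ kv.2))).map Prod.fst := by
  intro rels
  induction rels with
  | nil => intro d; simp
  | cons kv rest ih =>
      intro d
      simp only [List.foldl_cons, List.filter_cons]
      rw [ih, rev_inner kv.1 x (PySem.Set.ofList kv.2) (PySem.Set.nodup_ofList kv.2) d]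
      by_cases hx : x ∈ kv.2
      · rw [if_pos (by simpa [PySem.Set.mem_ofList] using hx), if_pos (by simpa using hx)]
        simp [List.append_assoc]
      · rw [if_neg (by simpa [PySem.Set.mem_ofList] using hx), if_neg (by simpa using hx)]
        simp

-- rev[x] is exactly the keys of the entries whose value list contains x, in order
theorem rev_getD (rels : List (String × List String)) (x : String) :
    (pvRevIdx rels).getD x [] = (rels.filter (fun kv => decide (x ∈ kv.2))).map Prod.fst := by
  have := rev_aux x rels PySem.Dict.empty
  simpa [pvRevIdx] using this

-- the two worklist loops keep used/visited identical; only the lengths are needed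
theorem loop_len (rels : List (String × List String)) :
    ∀ (fuel : Nat) (pending linked used : List String),
    (pvLoopA rels pending linked used fuel).length + used.length
      = (pvLoopB (pvRevIdx rels) pending used fuel).length + linked.length := by
  intro fuel
  induction fuel with
  | zero => intro pending linked used; cases pending <;> simp [pvLoopA, pvLoopB, Nat.add_comm]
  | succ fuel ih =>
      intro pending linked used
      cases pending with
      | nil => simp [pvLoopA, pvLoopB, Nat.add_comm]
      | cons x rest =>
          simp only [pvLoopA, pvLoopB]
          have hA := pvScanA_shape x rels [] linked used
          simp only [List.append_nil] at hA
          rw [hA]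
          rw [rev_getD rels x]
          have hB := pvScanB_shape ((rels.filter (fun kv => decide (x ∈ kv.2))).map Prod.fst) [] used
          simp only [List.append_nil] at hB
          rw [hB, pvNewsKeys_eq_pvNews]
          have := ih (rest ++ pvNews x rels used []) (linked ++ pvNews x rels used []) (used ++ pvNews x rels used [])
          simp only [List.length_append] at this ⊢
          omega

-- ===== VERDICT (by name: the statement is the Claim_ definition above) =====
theorem calculate_usage_score_spec : Claim_equal_calculate_usage_score := by
  intro node rels _
  unfold Spec_calculate_usage_score calculate_usage_score calculate_usage_score_alt
  have hS : rels.foldl (fun acc kv => if node ∈ kv.2 then acc ++ [kv.1] else acc) []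
      = (rels.filter (fun kv => decide (node ∈ kv.2))).map Prod.fst := by
    simpa using PySem.List.foldl_append_ite (fun kv => node ∈ kv.2) Prod.fst rels []
  simp only [hS, rev_getD rels node, PySem.Set.len]
  have h2 := loop_len rels
    (((rels.filter (fun kv => decide (node ∈ kv.2))).map Prod.fst).length + rels.length)
    ((rels.filter (fun kv => decide (node ∈ kv.2))).map Prod.fst)
    ((rels.filter (fun kv => decide (node ∈ kv.2))).map Prod.fst)
    []
  simp only [List.length_nil, Nat.add_zero] at h2
  rw [show (PySem.Set.empty : PySem.Set String) = ([] : List String) from rfl] at *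
  omega
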